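-- pv_equiv track=rewrite | github.com/baites/examples | coding/codeforces/balanced-team/balanced_team.py | solve
-- ===== SOURCE A (Python) =====
-- import bisect
--
-- def solve(skill, size):
--     skill.sort()
--     i = 0; j = 1
--     maxsize = 1
--     while j < size:
--         if skill[j] - skill[i] <= 5:
--             maxsize = max(maxsize, j-i+1)
--         else:
--             i = bisect.bisect_left(skill, skill[j]-5, i ,j)
--         j += 1
--     return maxsize
-- ===== SOURCE B (Python) =====
-- import bisect
--
-- def solve(skill, size):
--     skill.sort()
--     maxsize = 1
--     for i in range(size):
--         upper = bisect.bisect_right(skill, skill[i] + 5, i, size)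
--         maxsize = max(maxsize, upper - i)
--     return maxsize
-- ===== Notes on version B (the rewrite author's own statement) =====
-- stated objective: alternative
-- what changed: A advances the right endpoint with a stateful sliding window (jumping the left pointer by bisect_left only when the window breaks); B fixes each left endpoint and binary-searches its rightmost partner with bisect_right, keeping no window state.
-- outside the precondition, e.g. on solve([], 1): A returns 1, B raises IndexError
import Mathlib
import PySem

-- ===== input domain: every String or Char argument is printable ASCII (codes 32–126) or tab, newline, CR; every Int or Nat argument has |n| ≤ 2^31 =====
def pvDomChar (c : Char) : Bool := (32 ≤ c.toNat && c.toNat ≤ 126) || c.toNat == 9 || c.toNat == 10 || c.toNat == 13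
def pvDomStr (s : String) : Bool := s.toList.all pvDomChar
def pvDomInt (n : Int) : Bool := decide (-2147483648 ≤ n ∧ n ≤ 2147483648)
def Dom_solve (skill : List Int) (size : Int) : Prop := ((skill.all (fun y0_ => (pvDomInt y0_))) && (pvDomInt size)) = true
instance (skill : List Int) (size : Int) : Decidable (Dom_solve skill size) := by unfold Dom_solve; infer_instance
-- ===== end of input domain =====

-- B replaces A's stateful sliding window (advance right endpoint, jump left pointer by bisect_left when
-- the window breaks) by a stateless per-left-endpoint bisect_right; equivalence is about the RETURN value
-- (both A and B sort `skill` in place, the same observable mutation).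

-- ===== PORT A =====
-- while-loop body of A as a fold step over j = 1 .. size-1, state (i, maxsize).
-- bisect.bisect_left(s, x, lo, hi) is ported as lo + bisectLeft on the slice s[lo:hi];
-- exact here because solve sorts s before any call.
def stepA (s : List Int) (st : Int × Int) (j : Int) : Int × Int :=
  if PySem.List.pyGetD s j 0 - PySem.List.pyGetD s st.1 0 ≤ 5 then
    (st.1, max st.2 (j - st.1 + 1))
  else
    (st.1 + (PySem.List.bisectLeft (PySem.List.slice s (some st.1) (some j))
              (PySem.List.pyGetD s j 0 - 5) : Int), st.2)

def solve (skill : List Int) (size : Int) : Int :=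
  let s := PySem.List.sorted skill (fun x => x) false
  ((PySem.List.pyRange 1 size 1).foldl (stepA s) (0, 1)).2

-- ===== PORT B =====
-- loop body of B: for each left endpoint i, upper = bisect_right(skill, skill[i]+5, i, size),
-- ported (as above) as i + bisectRight on the slice s[i:size]; maxsize = max(maxsize, upper - i).
def stepB (s : List Int) (size : Int) (m : Int) (i : Int) : Int :=
  let upper : Int := i + (PySem.List.bisectRight (PySem.List.slice s (some i) (some size))
                           (PySem.List.pyGetD s i 0 + 5) : Int)
  max m (upper - i)

def solve_alt (skill : List Int) (size : Int) : Int :=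
  let s := PySem.List.sorted skill (fun x => x) false
  (PySem.List.pyRange 0 size 1).foldl (stepB s size) 1

-- ===== PRECONDITION & SPEC =====
-- Pre_ excludes size > len(skill): there A raises IndexError (skill[j]) except in the single corner
-- len = 0, size = 1, where A returns 1 only because its loop never touches the list while B's does
-- (B raises IndexError there).
def Pre_solve (skill : List Int) (size : Int) : Prop := size ≤ (skill.length : Int)
instance (skill : List Int) (size : Int) : Decidable (Pre_solve skill size) := by
  unfold Pre_solve; infer_instance

def pvWitness_solve : List Int × Int := ([1, 3, 10, 4], 4)

def Spec_solve (skill : List Int) (size : Int) (out : Int) : Prop := out = solve_alt skill size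
instance (skill : List Int) (size : Int) (out : Int) : Decidable (Spec_solve skill size out) := by
  unfold Spec_solve; infer_instance

-- ===== CLAIM (what is proved, stated in full; the proofs are below) =====
def Claim_equal_solve : Prop := ∀ (skill : List Int) (size : Int), Dom_solve skill size → Pre_solve skill size → Spec_solve skill size (solve skill size)

-- ===== LEMMAS AND PROOFS =====

-- Lf s t = leftmost feasible left endpoint for right endpoint t (on the sorted list s)
def Lf (s : List Int) (t : Nat) : Nat :=
  PySem.List.bisectLeft (s.take t) (s.getD t 0 - 5)

-- wlen s t = length of the maximal window ending at t
def wlen (s : List Int) (t : Nat) : Nat := t + 1 - Lf s t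

-- fwin s n i = length of the maximal window starting at i (within the first n elements)
def fwin (s : List Int) (n i : Nat) : Nat :=
  PySem.List.bisectRight ((s.drop i).take (n - i)) (s.getD i 0 + 5)

theorem getD_mono (s : List Int) (hs : List.Pairwise (· ≤ ·) s) (a b : Nat)
    (hab : a ≤ b) (hb : b < s.length) : s.getD a 0 ≤ s.getD b 0 := by
  rcases Nat.eq_or_lt_of_le hab with rfl | h
  · exact le_refl _
  · rw [List.getD_eq_getElem s 0 (lt_trans h hb), List.getD_eq_getElem s 0 hb]
    exact List.pairwise_iff_getElem.1 hs a b (lt_trans h hb) hb h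

theorem Lf_le (s : List Int) (hs : List.Pairwise (· ≤ ·) s) (t : Nat) (ht : t ≤ s.length) :
    Lf s t ≤ t := by
  have h := (PySem.List.bisectLeft_spec (s.take t) (s.getD t 0 - 5)
    (hs.sublist (List.take_sublist t s))).1
  simpa [Lf, Nat.min_eq_left ht] using h

theorem Lf_char (s : List Int) (hs : List.Pairwise (· ≤ ·) s) (t : Nat) (ht : t < s.length)
    (k : Nat) (hk : k < t) : (k < Lf s t ↔ s.getD k 0 < s.getD t 0 - 5) := by
  unfold Lf
  obtain ⟨h1, h2, h3⟩ := PySem.List.bisectLeft_spec (s.take t) (s.getD t 0 - 5)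
    (hs.sublist (List.take_sublist t s))
  have hkl : k < (s.take t).length := by simp [List.length_take]; omega
  have hkk : (s.take t)[k] = s.getD k 0 := by
    rw [List.getElem_take, List.getD_eq_getElem s 0 (lt_trans hk ht)]
  constructor
  · intro h; have := h2 k hkl h; rw [hkk] at this; omega
  · intro h; by_contra hc
    have := h3 k hkl (by omega); rw [hkk] at this; omega

theorem fwin_le (s : List Int) (hs : List.Pairwise (· ≤ ·) s) (n i : Nat)
    (hi : i ≤ n) (hn : n ≤ s.length) : fwin s n i ≤ n - i := by
  have h := (PySem.List.bisectRight_spec ((s.drop i).take (n - i)) (s.getD i 0 + 5)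
    (hs.sublist ((List.take_sublist _ _).trans (List.drop_sublist i s)))).1
  have hl : ((s.drop i).take (n - i)).length = n - i := by
    simp [List.length_take, List.length_drop]; omega
  simpa [fwin, hl] using h

theorem fwin_char (s : List Int) (hs : List.Pairwise (· ≤ ·) s) (n i : Nat)
    (hi : i < n) (hn : n ≤ s.length) (k : Nat) (hk : k < n - i) :
    (k < fwin s n i ↔ s.getD (i + k) 0 ≤ s.getD i 0 + 5) := by
  unfold fwin
  obtain ⟨h1, h2, h3⟩ := PySem.List.bisectRight_spec ((s.drop i).take (n - i)) (s.getD i 0 + 5)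
    (hs.sublist ((List.take_sublist _ _).trans (List.drop_sublist i s)))
  have hl : ((s.drop i).take (n - i)).length = n - i := by
    simp [List.length_take, List.length_drop]; omega
  have hkl : k < ((s.drop i).take (n - i)).length := by omega
  have hik : i + k < s.length := by omega
  have hkk : ((s.drop i).take (n - i))[k] = s.getD (i + k) 0 := by
    rw [List.getElem_take, List.getElem_drop, List.getD_eq_getElem s 0 hik]
  constructor
  · intro h; have := h2 k hkl h; rw [hkk] at this; omega
  · intro h; by_contra hc
    have := h3 k hkl (by omega); rw [hkk] at this; omega

theorem fwin_pos (s : List Int) (hs : List.Pairwise (· ≤ ·) s) (n i : Nat)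
    (hi : i < n) (hn : n ≤ s.length) : 1 ≤ fwin s n i := by
  have := (fwin_char s hs n i hi hn 0 (by omega)).2 (by simp)
  omega

-- the two suprema agree: max window ending somewhere = max window starting somewhere
theorem sup_wlen_eq_sup_fwin (s : List Int) (hs : List.Pairwise (· ≤ ·) s) (n : Nat)
    (hn : n ≤ s.length) :
    (Finset.range n).sup (wlen s) = (Finset.range n).sup (fwin s n) := by
  apply le_antisymm
  · apply Finset.sup_le
    intro t ht
    rw [Finset.mem_range] at ht
    have hLt : Lf s t ≤ t := Lf_le s hs t (by omega)
    refine le_trans ?_ (Finset.le_sup (f := fwin s n) (Finset.mem_range.2 (show Lf s t < n by omega)))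
    -- wlen s t ≤ fwin s n (Lf s t)
    have hfeas : s.getD t 0 ≤ s.getD (Lf s t) 0 + 5 := by
      rcases Nat.eq_or_lt_of_le hLt with he | hlt
      · rw [he]; omega
      · have := (Lf_char s hs t (by omega) (Lf s t) hlt).1
        by_contra hc
        have h2 := (Lf_char s hs t (by omega) (Lf s t) hlt).2 (by omega)
        omega
    have : t - Lf s t < fwin s n (Lf s t) := by
      refine (fwin_char s hs n (Lf s t) (by omega) hn (t - Lf s t) (by omega)).2 ?_
      have : Lf s t + (t - Lf s t) = t := by omega
      rw [this]; exact hfeas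
    unfold wlen; omega
  · apply Finset.sup_le
    intro i hi
    rw [Finset.mem_range] at hi
    have hpos := fwin_pos s hs n i hi hn
    have hle := fwin_le s hs n i (by omega) hn
    set t := i + fwin s n i - 1 with hht
    have htn : t < n := by omega
    refine le_trans ?_ (Finset.le_sup (f := wlen s) (Finset.mem_range.2 htn))
    -- fwin s n i ≤ wlen s t, because Lf s t ≤ i
    have hLt : Lf s t ≤ i := by
      by_contra hc
      push Not at hc
      have hit : i < t := by
        have := Lf_le s hs t (by omega); omega
      have h1 : s.getD i 0 < s.getD t 0 - 5 := (Lf_char s hs t (by omega) i hit).1 hc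
      have h2 : s.getD (i + (fwin s n i - 1)) 0 ≤ s.getD i 0 + 5 :=
        (fwin_char s hs n i hi hn (fwin s n i - 1) (by omega)).1 (by omega)
      have : i + (fwin s n i - 1) = t := by omega
      rw [this] at h2; omega
    unfold wlen; omega

-- the if-branch keeps the leftmost feasible endpoint
theorem Lf_succ_of_feas (s : List Int) (hs : List.Pairwise (· ≤ ·) s) (t : Nat)
    (ht : t + 1 < s.length) (hfeas : s.getD (t + 1) 0 - s.getD (Lf s t) 0 ≤ 5) :
    Lf s (t + 1) = Lf s t := by
  have hLt : Lf s t ≤ t := Lf_le s hs t (by omega)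
  have hLt1 : Lf s (t + 1) ≤ t + 1 := Lf_le s hs (t + 1) (by omega)
  by_contra hne
  rcases Nat.lt_or_ge (Lf s (t + 1)) (Lf s t) with h | h
  · -- k := Lf s (t+1) < Lf s t ≤ t
    have h1 : s.getD (Lf s (t + 1)) 0 < s.getD t 0 - 5 :=
      (Lf_char s hs t (by omega) _ (by omega)).1 h
    have h2 : ¬ s.getD (Lf s (t + 1)) 0 < s.getD (t + 1) 0 - 5 := by
      intro hc
      have := (Lf_char s hs (t + 1) ht _ (by omega)).2 hc
      omega
    have := getD_mono s hs t (t + 1) (by omega) ht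
    omega
  · have hlt : Lf s t < Lf s (t + 1) := by omega
    have := (Lf_char s hs (t + 1) ht (Lf s t) (by omega)).1 hlt
    omega

-- the else-branch bisect lands on the leftmost feasible endpoint for t+1
theorem Lf_succ_of_infeas (s : List Int) (hs : List.Pairwise (· ≤ ·) s) (t : Nat)
    (ht : t + 1 < s.length) (hinf : ¬ s.getD (t + 1) 0 - s.getD (Lf s t) 0 ≤ 5) :
    Lf s t + PySem.List.bisectLeft ((s.drop (Lf s t)).take (t + 1 - Lf s t))
      (s.getD (t + 1) 0 - 5) = Lf s (t + 1) := by
  have hLt : Lf s t ≤ t := Lf_le s hs t (by omega)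
  have hLt1 : Lf s (t + 1) ≤ t + 1 := Lf_le s hs (t + 1) (by omega)
  set c := PySem.List.bisectLeft ((s.drop (Lf s t)).take (t + 1 - Lf s t))
    (s.getD (t + 1) 0 - 5) with hc
  obtain ⟨h1, h2, h3⟩ := PySem.List.bisectLeft_spec ((s.drop (Lf s t)).take (t + 1 - Lf s t))
    (s.getD (t + 1) 0 - 5)
    (hs.sublist ((List.take_sublist _ _).trans (List.drop_sublist _ s)))
  have hl : ((s.drop (Lf s t)).take (t + 1 - Lf s t)).length = t + 1 - Lf s t := by
    simp [List.length_take, List.length_drop]; omega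
  rw [hl] at h1
  have hseg : ∀ k (hk : k < t + 1 - Lf s t),
      ((s.drop (Lf s t)).take (t + 1 - Lf s t))[k]'(by omega) = s.getD (Lf s t + k) 0 := by
    intro k hk
    rw [List.getElem_take, List.getElem_drop, List.getD_eq_getElem s 0 (by omega)]
  -- every index below Lf s t + c is infeasible for t+1
  have hbelow : ∀ k, k < Lf s t + c → s.getD k 0 < s.getD (t + 1) 0 - 5 := by
    intro k hk
    rcases Nat.lt_or_ge k (Lf s t) with h | h
    · have h1' : s.getD k 0 < s.getD t 0 - 5 := (Lf_char s hs t (by omega) k (by omega)).1 h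
      have := getD_mono s hs t (t + 1) (by omega) ht
      omega
    · have hk' : k - Lf s t < c := by omega
      have := h2 (k - Lf s t) (by omega) hk'
      rw [hseg (k - Lf s t) (by omega)] at this
      have heq : Lf s t + (k - Lf s t) = k := by omega
      rw [heq] at this; exact this
  apply le_antisymm
  · -- Lf s t + c ≤ Lf s (t+1)
    by_contra hcon
    push Not at hcon
    have hk : Lf s (t + 1) < t + 1 := by
      rcases Nat.eq_or_lt_of_le hLt1 with he | hlt
      · exfalso; omega
      · omega
    have := hbelow (Lf s (t + 1)) hcon
    have h2' := (Lf_char s hs (t + 1) ht (Lf s (t + 1)) hk).2 this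
    omega
  · -- Lf s (t+1) ≤ Lf s t + c
    by_contra hcon
    push Not at hcon
    have hk : Lf s t + c < t + 1 := by omega
    have hfe := h3 c (by omega) (le_refl c)
    rw [hseg c (by omega)] at hfe
    have := (Lf_char s hs (t + 1) ht (Lf s t + c) (by omega)).1 hcon
    omega

theorem Lf_succ_gt_of_infeas (s : List Int) (hs : List.Pairwise (· ≤ ·) s) (t : Nat)
    (ht : t + 1 < s.length) (hinf : ¬ s.getD (t + 1) 0 - s.getD (Lf s t) 0 ≤ 5) :
    Lf s t < Lf s (t + 1) := by
  have hLt : Lf s t ≤ t := Lf_le s hs t (by omega)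
  exact (Lf_char s hs (t + 1) ht (Lf s t) (by omega)).2 (by omega)

theorem Lf_zero (s : List Int) : Lf s 0 = 0 := by
  have h : Lf s 0 ≤ (s.take 0).length :=
    (PySem.List.bisectLeft_spec (s.take 0) (s.getD 0 0 - 5) (by simp)).1
  simp at h
  omega

-- A's fold computes (Lf, 1 ⊔ sup of window lengths by right endpoint)
theorem foldA_eq (s : List Int) (hs : List.Pairwise (· ≤ ·) s) (n : Nat) (hn : n ≤ s.length)
    (t : Nat) (htn : t < n) :
    (PySem.List.pyRange 1 ((t : Int) + 1) 1).foldl (stepA s) (0, 1) =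
      ((Lf s t : Int), max 1 (((Finset.range (t + 1)).sup (wlen s) : Nat) : Int)) := by
  induction t with
  | zero =>
    rw [PySem.List.pyRange_one_eq_nil (by omega)]
    have h1 : (Finset.range 1).sup (wlen s) = wlen s 0 := by
      rw [Finset.range_one, Finset.sup_singleton]
    have h2 : wlen s 0 = 1 := by unfold wlen; rw [Lf_zero]
    simp [h2, Lf_zero]
  | succ t ih =>
    have ht1 : t + 1 < s.length := by omega
    have hLt : Lf s t ≤ t := Lf_le s hs t (by omega)
    have hLt1 : Lf s (t + 1) ≤ t + 1 := Lf_le s hs (t + 1) (by omega)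
    push_cast
    rw [PySem.List.pyRange_one_succ_right (by omega), List.foldl_append, ih (by omega)]
    simp only [List.foldl_cons, List.foldl_nil]
    unfold stepA
    rw [show ((t : Int) + 1) = ((t + 1 : Nat) : Int) by push_cast; ring]
    simp only [PySem.List.pyGetD_natCast]
    have hsup : (Finset.range (t + 1 + 1)).sup (wlen s) =
        max (wlen s (t + 1)) ((Finset.range (t + 1)).sup (wlen s)) := by
      rw [Finset.range_add_one, Finset.sup_insert]
    split_ifs with hfeas
    · -- feasible branch: left pointer stays, maxsize updated
      have hL : Lf s (t + 1) = Lf s t := Lf_succ_of_feas s hs t ht1 hfeas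
      have hw : wlen s (t + 1) = t + 2 - Lf s t := by unfold wlen; rw [hL]
      rw [hL, hsup, hw]
      refine Prod.ext_iff.mpr ⟨rfl, ?_⟩
      push_cast [Nat.cast_sub (show Lf s t ≤ t + 2 by omega)]
      omega
    · -- infeasible branch: left pointer jumps by bisect, maxsize unchanged
      have hL := Lf_succ_of_infeas s hs t ht1 hfeas
      have hLgt := Lf_succ_gt_of_infeas s hs t ht1 hfeas
      refine Prod.ext_iff.mpr ⟨?_, ?_⟩
      · show (Lf s t : Int) + _ = ((Lf s (t + 1) : Nat) : Int)
        rw [PySem.List.slice_natCast, ← hL]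
        push_cast; ring
      · show max 1 (((Finset.range (t + 1)).sup (wlen s) : Nat) : Int) =
          max 1 (((Finset.range (t + 1 + 1)).sup (wlen s) : Nat) : Int)
        have hwle : wlen s (t + 1) ≤ wlen s t := by unfold wlen; omega
        have hmem : wlen s t ≤ (Finset.range (t + 1)).sup (wlen s) :=
          Finset.le_sup (Finset.mem_range.2 (by omega))
        rw [hsup, Nat.max_eq_right (by omega)]

-- B's fold computes 1 ⊔ sup of window lengths by left endpoint
theorem foldB_eq (s : List Int) (hs : List.Pairwise (· ≤ ·) s) (n : Nat) (hn : n ≤ s.length)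
    (t : Nat) (htn : t ≤ n) :
    (PySem.List.pyRange 0 (t : Int) 1).foldl (stepB s (n : Int)) 1 =
      max 1 (((Finset.range t).sup (fwin s n) : Nat) : Int) := by
  induction t with
  | zero => rw [PySem.List.pyRange_one_eq_nil (by omega)]; simp
  | succ t ih =>
    push_cast
    rw [PySem.List.pyRange_one_succ_right (by omega), List.foldl_append, ih (by omega)]
    simp only [List.foldl_cons, List.foldl_nil]
    simp only [stepB]
    rw [PySem.List.slice_natCast, PySem.List.pyGetD_natCast]
    have hsup : (Finset.range (t + 1)).sup (fwin s n) =
        max (fwin s n t) ((Finset.range t).sup (fwin s n)) := by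
      rw [Finset.range_add_one, Finset.sup_insert]
    rw [hsup]
    show max (max 1 _) ((t : Int) + (fwin s n t : Int) - (t : Int)) = _
    push_cast
    omega

-- ===== VERDICT (by name: the statement is the Claim_ definition above) =====
theorem solve_spec : Claim_equal_solve := by
  intro skill size _ hpre
  unfold Spec_solve solve solve_alt
  set s := PySem.List.sorted skill (fun x => x) false with hsdef
  have hs : List.Pairwise (· ≤ ·) s := PySem.List.sorted_pairwise skill (fun x => x)
  have hlen : s.length = skill.length := PySem.List.length_sorted skill (fun x => x) false
  unfold Pre_solve at hpre
  rcases le_or_gt size 0 with hsz | hsz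
  · rw [PySem.List.pyRange_one_eq_nil (by omega), PySem.List.pyRange_one_eq_nil (by omega)]
    rfl
  · -- size ≥ 1; write size as a natural number n
    obtain ⟨n, rfl⟩ : ∃ m : Nat, size = (m : Int) :=
      ⟨size.toNat, (Int.toNat_of_nonneg (by omega)).symm⟩
    have hn1 : 1 ≤ n := by omega
    have hn : n ≤ s.length := by omega
    have hA := foldA_eq s hs n hn (n - 1) (by omega)
    have hB := foldB_eq s hs n hn n (le_refl n)
    have hn' : ((n : Nat) : Int) = ((n - 1 : Nat) : Int) + 1 := by omega
    rw [hn']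
    show (List.foldl (stepA s) (0, 1) (PySem.List.pyRange 1 (((n - 1 : Nat) : Int) + 1))).2 =
      List.foldl (stepB s (((n - 1 : Nat) : Int) + 1)) 1
        (PySem.List.pyRange 0 (((n - 1 : Nat) : Int) + 1))
    rw [hA, ← hn', hB, show n - 1 + 1 = n by omega, sup_wlen_eq_sup_fwin s hs n hn]
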